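-- pv_equiv track=rewrite | github.com/jordicor/GranSabio_LLM | tools/repetition_analyzer.py | tokenize_alnum_with_spans
-- ===== SOURCE A (Python) =====
-- import unicodedata
-- from typing import Any, Dict, List, Tuple, Optional, Set
--
-- def strip_accents(text: str) -> str:
--     nfkd = unicodedata.normalize("NFKD", text)
--     return "".join(ch for ch in nfkd if not unicodedata.combining(ch))
--
-- def _remove_invisible_control(text: str) -> str:
--     out: List[str] = []
--     for ch in text:
--         cat = unicodedata.category(ch)
--         if cat == "Cf":
--             continue
--         if cat == "Cc" and ch not in ("\n", "\t"):
--             out.append(" ")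
--             continue
--         out.append(ch)
--     return "".join(out)
--
-- def tokenize_alnum_with_spans(
--     text: str,
--     lowercase: bool = True,
--     remove_accents_flag: bool = False,
-- ) -> Tuple[List[str], List[Tuple[int, int]]]:
--     clean = _remove_invisible_control(text)
--     tokens: List[str] = []
--     spans: List[Tuple[int, int]] = []
--     buf: List[str] = []
--     start_idx: Optional[int] = None
--     for i, ch in enumerate(clean):
--         if ch.isalnum():
--             if start_idx is None:
--                 start_idx = i
--             buf.append(ch)
--         else:
--             if buf:
--                 surface = "".join(buf)
--                 if remove_accents_flag:
--                     surface = strip_accents(surface)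
--                 if lowercase:
--                     surface = surface.lower()
--                 tokens.append(surface)
--                 spans.append((start_idx, i))
--                 buf = []
--                 start_idx = None
--     if buf:
--         surface = "".join(buf)
--         if remove_accents_flag:
--             surface = strip_accents(surface)
--         if lowercase:
--             surface = surface.lower()
--         tokens.append(surface)
--         spans.append((start_idx if start_idx is not None else 0, len(clean)))
--     return tokens, spans
-- ===== SOURCE B (Python) =====
-- import unicodedata
-- from typing import List, Tuple
--
--
-- def strip_accents(text: str) -> str:
--     nfkd = unicodedata.normalize("NFKD", text)
--     return "".join(ch for ch in nfkd if not unicodedata.combining(ch))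
--
--
-- def _remove_invisible_control(text: str) -> str:
--     out: List[str] = []
--     for ch in text:
--         cat = unicodedata.category(ch)
--         if cat == "Cf":
--             continue
--         if cat == "Cc" and ch not in ("\n", "\t"):
--             out.append(" ")
--             continue
--         out.append(ch)
--     return "".join(out)
--
--
-- def tokenize_alnum_with_spans(
--     text: str,
--     lowercase: bool = True,
--     remove_accents_flag: bool = False,
-- ) -> Tuple[List[str], List[Tuple[int, int]]]:
--     # Staged boundary-detection approach: compute the alnum flag vector once,
--     # find run starts (flag set, previous flag unset) and run ends (flag set,
--     # next flag unset) as two independent index scans, pair them up with zip,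
--     # and recover each token by slicing the cleaned text.
--     clean = _remove_invisible_control(text)
--     n = len(clean)
--     flags = [ch.isalnum() for ch in clean]
--     starts = [i for i in range(n) if flags[i] and (i == 0 or not flags[i - 1])]
--     ends = [i + 1 for i in range(n) if flags[i] and (i == n - 1 or not flags[i + 1])]
--     spans = list(zip(starts, ends))
--     tokens: List[str] = []
--     for s, e in spans:
--         surface = clean[s:e]
--         if remove_accents_flag:
--             surface = strip_accents(surface)
--         if lowercase:
--             surface = surface.lower()
--         tokens.append(surface)
--     return tokens, spans
-- ===== Notes on version B (the rewrite author's own statement) =====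
-- stated objective: alternative
-- what changed: Replaces A's single-pass buffer/start_idx state machine (with its trailing-flush branch) by staged passes: an alnum flag vector, two independent boundary scans yielding run starts and run ends, zip to spans, and slicing the cleaned text to recover each token.
import Mathlib
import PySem

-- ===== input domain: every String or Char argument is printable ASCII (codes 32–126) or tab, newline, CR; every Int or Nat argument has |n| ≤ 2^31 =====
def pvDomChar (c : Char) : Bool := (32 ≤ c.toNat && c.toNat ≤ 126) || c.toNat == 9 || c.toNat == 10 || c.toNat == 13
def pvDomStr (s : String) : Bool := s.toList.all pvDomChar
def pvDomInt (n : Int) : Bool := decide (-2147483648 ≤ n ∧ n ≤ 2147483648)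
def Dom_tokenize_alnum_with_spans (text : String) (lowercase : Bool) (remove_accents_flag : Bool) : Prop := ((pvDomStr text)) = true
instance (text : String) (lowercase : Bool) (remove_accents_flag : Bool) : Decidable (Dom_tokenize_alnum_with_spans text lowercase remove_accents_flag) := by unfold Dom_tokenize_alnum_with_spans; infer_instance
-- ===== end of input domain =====

-- B replaces A's single-pass buffer/start_idx state machine by staged passes: a flag vector,
-- two boundary scans (run starts / run ends), zip, and slicing; objective: alternative.
-- Shared helpers, identical lines in both Pythons (exact on the printable-ASCII + tab/newline/CR domain):

-- strip_accents: NFKD normalisation and dropping combining marks is the identity on ASCII.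
def pvStripAccents (cs : List Char) : List Char := cs

-- _remove_invisible_control: on the ASCII domain no char has category Cf (that branch never
-- fires); category Cc there is exactly code < 32 or 127, of which only \t \n \r occur.
def pvRemoveInvisible (cs : List Char) : List Char :=
  cs.map (fun c => if (c.toNat < 32 || c.toNat == 127) && !(c == '\n' || c == '\t') then ' ' else c)

-- the surface post-processing lines (identical in A and B)
def pvSurface (lowercase remove_accents_flag : Bool) (buf : List Char) : String :=
  let s := if remove_accents_flag then pvStripAccents buf else buf
  String.ofList (if lowercase then PySem.Chars.lower s else s)

-- ===== PORT A =====
-- A's for-loop over enumerate(clean) with state (tokens, spans, buf, start_idx); n = len(clean)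
-- is used by the trailing flush.  The `.getD 0` defaults stand for Python's start_idx when it is
-- None (the `start_idx if start_idx is not None else 0` expression, resp. unreachable).
def pvLoopA (lc ra : Bool) (n : Nat) :
    Nat → List Char → List String → List (Int × Int) → List Char → Option Nat →
    List String × (List (Int × Int))
  | _, [], toks, spans, buf, start =>
      if buf.isEmpty then (toks, spans)
      else (toks ++ [pvSurface lc ra buf], spans ++ [(((start.getD 0 : Nat) : Int), (n : Int))])
  | i, c :: cs, toks, spans, buf, start =>
      if PySem.Chars.isalnum c then
        pvLoopA lc ra n (i + 1) cs toks spans (buf ++ [c])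
          (match start with | none => some i | some s => some s)
      else
        if buf.isEmpty then pvLoopA lc ra n (i + 1) cs toks spans buf start
        else pvLoopA lc ra n (i + 1) cs (toks ++ [pvSurface lc ra buf])
          (spans ++ [(((start.getD 0 : Nat) : Int), (i : Int))]) [] none

def tokenize_alnum_with_spans (text : String) (lowercase : Bool) (remove_accents_flag : Bool) :
    List String × (List (Int × Int)) :=
  let clean := pvRemoveInvisible text.toList
  pvLoopA lowercase remove_accents_flag clean.length 0 clean [] [] [] none

-- ===== PORT B =====
-- flags = [ch.isalnum() for ch in clean]
def pvFlags (cs : List Char) : List Bool := cs.map PySem.Chars.isalnum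

-- starts = [i for i in range(n) if flags[i] and (i == 0 or not flags[i-1])]
def pvStarts (flags : List Bool) : List Nat :=
  (List.range flags.length).filter
    (fun i => flags.getD i false && (decide (i = 0) || !(flags.getD (i - 1) false)))

-- ends = [i+1 for i in range(n) if flags[i] and (i == n-1 or not flags[i+1])]
def pvEnds (n : Nat) (flags : List Bool) : List Nat :=
  ((List.range n).filter
    (fun i => flags.getD i false && (decide (i = n - 1) || !(flags.getD (i + 1) false)))).map (· + 1)

def tokenize_alnum_with_spans_alt (text : String) (lowercase : Bool) (remove_accents_flag : Bool) :
    List String × (List (Int × Int)) :=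
  let clean := pvRemoveInvisible text.toList
  let n := clean.length
  let flags := pvFlags clean
  let spansN := (pvStarts flags).zip (pvEnds n flags)
  let tokens := spansN.map (fun p =>
    pvSurface lowercase remove_accents_flag
      (PySem.List.slice clean (some (p.1 : Int)) (some (p.2 : Int))))
  (tokens, spansN.map (fun p => ((p.1 : Int), (p.2 : Int))))

-- ===== PRECONDITION & SPEC =====
def Spec_tokenize_alnum_with_spans (text : String) (lowercase : Bool) (remove_accents_flag : Bool) (out : List String × (List (Int × Int))) : Prop := out = tokenize_alnum_with_spans_alt text lowercase remove_accents_flag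
instance (text : String) (lowercase : Bool) (remove_accents_flag : Bool) (out : List String × (List (Int × Int))) : Decidable (Spec_tokenize_alnum_with_spans text lowercase remove_accents_flag out) := by unfold Spec_tokenize_alnum_with_spans; infer_instance

-- ===== CLAIM (what is proved, stated in full; the proofs are below) =====
def Claim_equal_tokenize_alnum_with_spans : Prop := ∀ (text : String) (lowercase : Bool) (remove_accents_flag : Bool), Dom_tokenize_alnum_with_spans text lowercase remove_accents_flag → Spec_tokenize_alnum_with_spans text lowercase remove_accents_flag (tokenize_alnum_with_spans text lowercase remove_accents_flag)

-- ===== LEMMAS AND PROOFS =====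

-- Proof-side description of the maximal alnum runs of cs starting at absolute index i:
-- (start, end, chars) per run.  Both ports are proved equal to maps over this list.
def pvRuns : Nat → List Char → List (Nat × Nat × List Char)
  | _, [] => []
  | i, c :: cs =>
      if PySem.Chars.isalnum c then
        let t := c :: cs.takeWhile PySem.Chars.isalnum
        (i, i + t.length, t) :: pvRuns (i + t.length) (cs.dropWhile PySem.Chars.isalnum)
      else pvRuns (i + 1) cs
  termination_by _ cs => cs.length
  decreasing_by
    · simpa using Nat.lt_succ_of_le (List.length_dropWhile_le _ _)
    · simp

-- A's loop against the run list (two buffer states).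
theorem pvRuns_invA (lc ra : Bool) (n : Nat) :
    ∀ cs i, n = i + cs.length → ∀ toks spans,
      (pvLoopA lc ra n i cs toks spans [] none
         = (toks ++ (pvRuns i cs).map (fun r => pvSurface lc ra r.2.2),
            spans ++ (pvRuns i cs).map (fun r => ((r.1 : Int), (r.2.1 : Int))))) ∧
      (∀ b s, b ≠ [] →
        pvLoopA lc ra n i cs toks spans b (some s)
          = (toks ++ pvSurface lc ra (b ++ cs.takeWhile PySem.Chars.isalnum)
                :: ((pvRuns (i + (cs.takeWhile PySem.Chars.isalnum).length)
                      (cs.dropWhile PySem.Chars.isalnum)).map (fun r => pvSurface lc ra r.2.2)),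
             spans ++ ((s : Int), ((i + (cs.takeWhile PySem.Chars.isalnum).length : Nat) : Int))
                :: ((pvRuns (i + (cs.takeWhile PySem.Chars.isalnum).length)
                      (cs.dropWhile PySem.Chars.isalnum)).map (fun r => ((r.1 : Int), (r.2.1 : Int)))))) := by
  intro cs
  induction cs with
  | nil =>
      intro i hn toks spans
      constructor
      · simp [pvLoopA, pvRuns]
      · intro b s hb
        simp at hn
        simp [pvLoopA, pvRuns, hb, hn]
  | cons c cs ih =>
      intro i hn toks spans
      have hn' : n = (i + 1) + cs.length := by simp at hn; omega
      have hT : ∀ T : Nat, i + 1 + T = i + (T + 1) := by omega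
      constructor
      · by_cases hc : PySem.Chars.isalnum c = true
        · rw [pvLoopA]
          simp only [hc, if_true, List.nil_append]
          rw [(ih (i + 1) hn' toks spans).2 [c] i (by simp)]
          rw [pvRuns]
          simp only [hc, if_true, List.length_cons,
            hT, List.singleton_append, List.map_cons]
        · rw [pvLoopA]
          simp only [hc, Bool.false_eq_true, if_false, List.isEmpty_nil, if_true]
          rw [(ih (i + 1) hn' toks spans).1]
          rw [pvRuns]
          simp [hc]
      · intro b s hb
        by_cases hc : PySem.Chars.isalnum c = true
        · rw [pvLoopA]
          simp only [hc, if_true]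
          rw [(ih (i + 1) hn' toks spans).2 (b ++ [c]) s (by simp)]
          simp only [List.takeWhile_cons, List.dropWhile_cons, hc, if_true, List.length_cons,
            hT, List.append_assoc, List.singleton_append]
        · rw [pvLoopA]
          have hbe : b.isEmpty = false := by simp [hb]
          simp only [hc, Bool.false_eq_true, if_false, hbe, Option.getD_some]
          rw [(ih (i + 1) hn' (toks ++ [pvSurface lc ra b])
                (spans ++ [((s : Int), (i : Int))])).1]
          simp only [List.takeWhile_cons, List.dropWhile_cons, hc, Bool.false_eq_true, if_false]
          rw [pvRuns]
          simp [hc]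

-- ==== B side: the boundary filters as structural recursions ====

theorem pvFlags_cons (c : Char) (cs : List Char) :
    pvFlags (c :: cs) = PySem.Chars.isalnum c :: pvFlags cs := rfl


def pvSfun (prev : Bool) : List Bool → List Nat
  | [] => []
  | b :: fl => (if b && !prev then [0] else []) ++ (pvSfun b fl).map (· + 1)

def pvEfun : List Bool → List Nat
  | [] => []
  | b :: fl => (if b && !(fl.getD 0 false) then [0] else []) ++ (pvEfun fl).map (· + 1)

theorem pvStarts_eq_Sfun : ∀ (fl : List Bool) (prev : Bool),
    (List.range fl.length).filter
      (fun i => fl.getD i false && (decide (i = 0) && !prev || !decide (i = 0) && !(fl.getD (i - 1) false)))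
      = pvSfun prev fl := by
  intro fl
  induction fl with
  | nil => intro prev; simp [pvSfun]
  | cons b fl ih =>
      intro prev
      simp only [List.length_cons]
      rw [List.range_succ_eq_map, List.filter_cons, List.filter_map]
      have htail : (List.range fl.length).filter
          ((fun i => (b :: fl).getD i false &&
            (decide (i = 0) && !prev || !decide (i = 0) && !((b :: fl).getD (i - 1) false))) ∘ Nat.succ)
          = (List.range fl.length).filter
          (fun i => fl.getD i false && (decide (i = 0) && !b || !decide (i = 0) && !(fl.getD (i - 1) false))) := by
        apply List.filter_congr
        intro i _
        cases i with
        | zero => simp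
        | succ j => simp
      rw [htail, ih b, pvSfun]
      by_cases hb : (b && !prev) = true
      · simp [hb]
      · simp [hb]

theorem pvEnds_eq_Efun : ∀ (fl : List Bool),
    (List.range fl.length).filter (fun i => fl.getD i false && !(fl.getD (i + 1) false))
      = pvEfun fl := by
  intro fl
  induction fl with
  | nil => simp [pvEfun]
  | cons b fl ih =>
      simp only [List.length_cons]
      rw [List.range_succ_eq_map, List.filter_cons, List.filter_map]
      have htail : (List.range fl.length).filter
          ((fun i => (b :: fl).getD i false && !((b :: fl).getD (i + 1) false)) ∘ Nat.succ)
          = (List.range fl.length).filter (fun i => fl.getD i false && !(fl.getD (i + 1) false)) := by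
        apply List.filter_congr
        intro i _
        simp
      rw [htail, ih, pvEfun]
      split_ifs <;> simp_all

-- The two range-filters of B equal the recursions (rewriting the guarded boolean forms).
theorem pvStarts_spec (fl : List Bool) : pvStarts fl = pvSfun false fl := by
  rw [← pvStarts_eq_Sfun fl false]
  unfold pvStarts
  apply List.filter_congr
  intro i _
  by_cases h : i = 0 <;> simp [h]

theorem pvEnds_spec (fl : List Bool) : pvEnds fl.length fl = (pvEfun fl).map (· + 1) := by
  unfold pvEnds
  rw [← pvEnds_eq_Efun fl]
  congr 1
  apply List.filter_congr
  intro i hi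
  simp only [List.mem_range] at hi
  by_cases h : i = fl.length - 1
  · have h1 : fl[i + 1]? = none := by
      apply List.getElem?_eq_none
      omega
    subst h
    simp [h1]
  · simp [h]

-- Sfun against the run starts (two states: out of run / in run).
theorem pvSfun_runs : ∀ (cs : List Char) (i : Nat),
    ((pvSfun false (pvFlags cs)).map (· + i) = (pvRuns i cs).map (fun r => r.1)) ∧
    ((pvSfun true (pvFlags cs)).map (· + i)
       = (pvRuns (i + (cs.takeWhile PySem.Chars.isalnum).length)
           (cs.dropWhile PySem.Chars.isalnum)).map (fun r => r.1)) := by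
  intro cs
  induction cs with
  | nil => intro i; simp [pvSfun, pvFlags, pvRuns]
  | cons c cs ih =>
      intro i
      have hmm : ∀ (l : List Nat) (j : Nat),
          (l.map (· + 1)).map (· + j) = l.map (· + (j + 1)) := by
        intro l j; rw [List.map_map]; apply List.map_congr_left; intro x _; simp; omega
      have hsw : i + 1 + (cs.takeWhile PySem.Chars.isalnum).length
          = i + ((cs.takeWhile PySem.Chars.isalnum).length + 1) := by omega
      constructor
      · by_cases hc : PySem.Chars.isalnum c = true
        · rw [pvRuns]
          simp only [pvFlags_cons, pvSfun, hc, Bool.not_false, Bool.and_self, if_true,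
            List.singleton_append, List.length_cons,
            List.map_cons, Nat.zero_add]
          rw [hmm, (ih (i + 1)).2, hsw]
        · rw [pvRuns]
          simp only [pvFlags_cons, pvSfun, hc, Bool.false_and, if_false, Bool.false_eq_true,
            List.nil_append]
          rw [hmm, (ih (i + 1)).1]
      · by_cases hc : PySem.Chars.isalnum c = true
        · simp only [pvFlags_cons, pvSfun, hc, Bool.not_true, Bool.and_false, if_false,
            List.nil_append, List.takeWhile_cons, if_true, List.length_cons,
            List.dropWhile_cons, Bool.false_eq_true]
          rw [hmm, (ih (i + 1)).2, hsw]
        · simp only [pvFlags_cons, pvSfun, hc, Bool.false_and, if_false, List.nil_append,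
            List.takeWhile_cons, List.dropWhile_cons, Bool.false_eq_true, List.length_nil,
            Nat.add_zero]
          rw [hmm, (ih (i + 1)).1, pvRuns]
          simp [hc]

-- Efun against the run ends (run continuation preserves the end list, so one state suffices).
theorem pvEfun_runs : ∀ (cs : List Char) (i : Nat),
    (pvEfun (pvFlags cs)).map (· + (i + 1)) = (pvRuns i cs).map (fun r => r.2.1) := by
  intro cs
  induction cs with
  | nil => intro i; simp [pvEfun, pvFlags, pvRuns]
  | cons c cs ih =>
      intro i
      have hmm : ∀ (l : List Nat) (j : Nat),
          (l.map (· + 1)).map (· + (j + 1)) = l.map (· + (j + 1 + 1)) := by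
        intro l j; rw [List.map_map]; apply List.map_congr_left; intro x _; simp; omega
      by_cases hc : PySem.Chars.isalnum c = true
      · rw [pvRuns]
        simp only [hc, if_true]
        cases cs with
        | nil =>
            simp [pvEfun, pvFlags, pvRuns, hc]
        | cons c' cs' =>
            rw [pvFlags_cons, pvEfun]
            have hg : (pvFlags (c' :: cs')).getD 0 false = PySem.Chars.isalnum c' := by
              rw [pvFlags_cons]; simp
            rw [hg]
            by_cases hc' : PySem.Chars.isalnum c' = true
            · rw [hc']
              simp only [Bool.not_true, Bool.and_false, Bool.false_eq_true, if_false,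
                List.nil_append]
              rw [hmm, ih (i + 1), pvRuns]
              simp only [hc', if_true, List.map_cons, List.takeWhile_cons, List.length_cons,
                List.dropWhile_cons]
              have e1 : i + 1 + ((cs'.takeWhile PySem.Chars.isalnum).length + 1)
                  = i + ((cs'.takeWhile PySem.Chars.isalnum).length + 1 + 1) := by omega
              rw [e1]
            · have hc'' : PySem.Chars.isalnum c' = false := by simpa using hc'
              rw [hc'', hc]
              simp only [Bool.not_false, Bool.and_true, if_true, List.singleton_append,
                List.map_cons]
              rw [hmm, ih (i + 1)]
              simp only [List.takeWhile_cons, List.dropWhile_cons, hc'', Bool.false_eq_true,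
                if_false, Nat.zero_add]
              simp
      · rw [pvRuns]
        simp only [hc, Bool.false_eq_true, if_false]
        simp only [pvFlags_cons, pvEfun, hc, Bool.false_and, if_false, List.nil_append,
          Bool.false_eq_true]
        rw [hmm, ih (i + 1)]

-- Each run's chars are recovered by slicing the original cleaned list.
theorem pvRuns_slice_aux : ∀ (k : Nat) (cs : List Char), cs.length ≤ k →
    ∀ (i : Nat) (clean : List Char), cs = clean.drop i →
    ∀ r ∈ pvRuns i cs, (clean.drop r.1).take (r.2.1 - r.1) = r.2.2 := by
  intro k
  induction k with
  | zero =>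
      intro cs hk i clean _ r hr
      have : cs = [] := List.eq_nil_of_length_eq_zero (by omega)
      subst this
      simp [pvRuns] at hr
  | succ k ih =>
      intro cs hk i clean hdrop r hr
      cases cs with
      | nil => simp [pvRuns] at hr
      | cons c cs =>
          rw [pvRuns] at hr
          by_cases hc : PySem.Chars.isalnum c = true
          · simp only [hc, if_true, List.mem_cons] at hr
            have htd := List.takeWhile_append_dropWhile (p := PySem.Chars.isalnum) (l := cs)
            set t := c :: cs.takeWhile PySem.Chars.isalnum with ht
            have hsplit : t ++ cs.dropWhile PySem.Chars.isalnum = c :: cs := by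
              simp [ht, htd]
            rcases hr with hr | hr
            · subst hr
              simp only [Nat.add_sub_cancel_left, ← hdrop, ← hsplit]
              exact List.take_left' rfl
            · have h2 : List.dropWhile PySem.Chars.isalnum cs = clean.drop (i + t.length) := by
                have hd : (clean.drop i).drop t.length = clean.drop (i + t.length) :=
                  List.drop_drop ..
                rw [← hdrop] at hd
                rw [← hsplit, List.drop_left] at hd
                rw [hd]
              refine ih (List.dropWhile PySem.Chars.isalnum cs) ?_ (i + t.length) clean h2 r hr
              have h3 := List.length_dropWhile_le (p := PySem.Chars.isalnum) (l := cs)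
              simp only [List.length_cons] at hk
              omega
          · simp only [hc, Bool.false_eq_true, if_false] at hr
            have h2 : cs = clean.drop (i + 1) := by
              have hd : (clean.drop i).drop 1 = clean.drop (i + 1) := List.drop_drop ..
              rw [← hdrop] at hd
              simp only [List.drop_one, List.tail_cons] at hd
              rw [hd]
            refine ih cs ?_ (i + 1) clean h2 r hr
            simp only [List.length_cons] at hk
            omega

theorem pvRuns_slice (clean : List Char) :
    ∀ r ∈ pvRuns 0 clean, (clean.drop r.1).take (r.2.1 - r.1) = r.2.2 :=
  pvRuns_slice_aux clean.length clean le_rfl 0 clean (by simp)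

-- ===== VERDICT (by name: the statement is the Claim_ definition above) =====
theorem tokenize_alnum_with_spans_spec : Claim_equal_tokenize_alnum_with_spans := by
  intro text lc ra _
  unfold Spec_tokenize_alnum_with_spans tokenize_alnum_with_spans tokenize_alnum_with_spans_alt
  dsimp only
  set clean := pvRemoveInvisible text.toList with hclean
  have hA := (pvRuns_invA lc ra clean.length clean 0 (by simp) [] []).1
  simp only [List.nil_append] at hA
  rw [hA]
  -- B side
  have hfl : (pvFlags clean).length = clean.length := by simp [pvFlags]
  have hs : pvStarts (pvFlags clean) = (pvRuns 0 clean).map (fun r => r.1) := by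
    rw [pvStarts_spec]
    have := (pvSfun_runs clean 0).1
    simpa using this
  have he : pvEnds clean.length (pvFlags clean) = (pvRuns 0 clean).map (fun r => r.2.1) := by
    rw [← hfl, pvEnds_spec]
    have := pvEfun_runs clean 0
    simpa using this
  rw [hs, he, List.zip_map']
  simp only [Prod.mk.injEq]
  constructor
  · rw [List.map_map]
    apply List.map_congr_left
    intro r hr
    have hslice := pvRuns_slice clean r hr
    simp only [Function.comp]
    rw [PySem.List.slice_natCast, hslice]
  · simp [Function.comp]
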